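-- pv_equiv track=rewrite | github.com/mirajp/tweet_sentiments | knn.py | processTest
-- ===== SOURCE A (Python) =====
-- def processTest(lexicon,testPhrase):
--     a = testPhrase.split(" ")
--     feats = []
--     pos = 0
--     neg = 0
--     chars = 0
--     for word in a:
--         chars += len(word)
--         try:
--             if lexicon[word.lower()] == 1:
--                 pos += 1
--             elif lexicon[word.lower()] == 0:
--                 neg += 1
--         except KeyError:
--             pass
--
--     feats.append(pos)
--     feats.append(neg)
--     feats.append(chars)
--
--     return feats
-- ===== SOURCE B (Python) =====
-- def processTest(lexicon, testPhrase):
--     # inverted index: the lexicon keys grouped by sentiment value, built once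
--     posSet = {k for k, v in lexicon.items() if v == 1}
--     negSet = {k for k, v in lexicon.items() if v == 0}
--     words = testPhrase.split(" ")
--     chars = len(testPhrase) - testPhrase.count(" ")
--     pos = sum(w.lower() in posSet for w in words)
--     neg = sum(w.lower() in negSet for w in words)
--     return [pos, neg, chars]
-- ===== Notes on version B (the rewrite author's own statement) =====
-- stated objective: alternative
-- what changed: B inverts the lookup direction: it precomputes the sets of lexicon keys with value 1 and with value 0 and classifies words by set membership instead of per-word dict lookup with try/except, and computes the character total in closed form as len(testPhrase) minus its space count instead of summing word lengths in a fused accumulator loop.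
import Mathlib
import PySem

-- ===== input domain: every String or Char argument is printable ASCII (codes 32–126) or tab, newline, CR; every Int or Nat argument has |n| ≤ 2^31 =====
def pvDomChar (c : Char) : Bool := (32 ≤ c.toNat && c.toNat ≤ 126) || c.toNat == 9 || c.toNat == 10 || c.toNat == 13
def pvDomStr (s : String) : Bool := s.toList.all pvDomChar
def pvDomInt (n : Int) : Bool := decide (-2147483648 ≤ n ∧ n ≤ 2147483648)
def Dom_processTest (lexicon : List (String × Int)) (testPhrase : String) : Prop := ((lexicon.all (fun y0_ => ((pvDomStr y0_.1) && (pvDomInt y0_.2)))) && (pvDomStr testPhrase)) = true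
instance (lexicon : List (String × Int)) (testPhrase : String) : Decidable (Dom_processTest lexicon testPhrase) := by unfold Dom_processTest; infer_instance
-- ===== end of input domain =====

-- B inverts the lookup direction: it precomputes the sets of lexicon keys with value 1 and with
-- value 0 and classifies words by set membership (no per-word dict lookup), and computes the
-- character total in closed form (length minus space count); objective: alternative.

-- ===== PORT A =====
-- lexicon[word.lower()] in Python (the dict lookup; none = KeyError, caught by A)
def lexGet (lexicon : List (String × Int)) (w : List Char) : Option Int :=
  (PySem.Dict.ofList lexicon).get? (String.ofList w)

def processTest (lexicon : List (String × Int)) (testPhrase : String) : List Int :=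
  let a := PySem.Chars.splitOn testPhrase.toList [' ']
  let st := a.foldl (fun (st : Int × Int × Int) word =>
      let chars := st.2.2 + (word.length : Int)
      match lexGet lexicon (PySem.Chars.lower word) with
      | some v =>
          if v == 1 then (st.1 + 1, st.2.1, chars)
          else if v == 0 then (st.1, st.2.1 + 1, chars)
          else (st.1, st.2.1, chars)
      | none => (st.1, st.2.1, chars)) (0, 0, 0)
  [st.1, st.2.1, st.2.2]

-- ===== PORT B =====
-- {k for k, v in lexicon.items() if v == val}
def keysWithVal (lexicon : List (String × Int)) (val : Int) : PySem.Set String :=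
  PySem.Set.ofList
    (((PySem.Dict.ofList lexicon).items.filter (fun p => p.2 == val)).map Prod.fst)

def processTest_alt (lexicon : List (String × Int)) (testPhrase : String) : List Int :=
  let posSet := keysWithVal lexicon 1
  let negSet := keysWithVal lexicon 0
  let words := PySem.Chars.splitOn testPhrase.toList [' ']
  let chars : Int := PySem.Str.len testPhrase - (PySem.Str.count testPhrase " " : Nat)
  let pos : Int := (words.countP (fun w => posSet.contains (String.ofList (PySem.Chars.lower w))) : Nat)
  let neg : Int := (words.countP (fun w => negSet.contains (String.ofList (PySem.Chars.lower w))) : Nat)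
  [pos, neg, chars]

-- ===== PRECONDITION & SPEC =====
def Spec_processTest (lexicon : List (String × Int)) (testPhrase : String) (out : List Int) : Prop := out = processTest_alt lexicon testPhrase
instance (lexicon : List (String × Int)) (testPhrase : String) (out : List Int) : Decidable (Spec_processTest lexicon testPhrase out) := by unfold Spec_processTest; infer_instance

-- ===== CLAIM (what is proved, stated in full; the proofs are below) =====
def Claim_equal_processTest : Prop := ∀ (lexicon : List (String × Int)) (testPhrase : String), Dom_processTest lexicon testPhrase → Spec_processTest lexicon testPhrase (processTest lexicon testPhrase)

-- ===== LEMMAS AND PROOFS =====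

-- counting occurrences of a single-character substring is List.count
lemma countGo_single (c : Char) : ∀ (fuel : Nat) (l : List Char) (acc : Nat),
    l.length ≤ fuel → PySem.Chars.count.go [c] fuel l acc = acc + l.count c := by
  intro fuel
  induction fuel with
  | zero =>
    intro l acc h
    have : l = [] := List.length_eq_zero_iff.mp (Nat.le_zero.mp h)
    subst this
    simp [PySem.Chars.count.go]
  | succ n ih =>
    intro l acc h
    cases l with
    | nil => simp [PySem.Chars.count.go]
    | cons hd t =>
      have ht : t.length ≤ n := by simpa using Nat.le_of_succ_le_succ h
      by_cases hc : c = hd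
      · subst hc
        simp [PySem.Chars.count.go, List.isPrefixOf, ih t (acc + 1) ht]
        omega
      · simp [PySem.Chars.count.go, List.isPrefixOf, hc, ih t acc ht, Ne.symm hc]

lemma charsCount_single (c : Char) (l : List Char) :
    PySem.Chars.count l [c] = l.count c := by
  simpa using countGo_single c l.length l 0 (le_refl _)

-- the summed lengths of the pieces of a single-character split
lemma splitGo_sum (c : Char) : ∀ (fuel : Nat) (l cur : List Char) (acc : List (List Char)),
    l.length < fuel →
    ((PySem.Chars.splitOn.go [c] fuel l cur acc).map List.length).sum
      = (acc.map List.length).sum + cur.length + (l.length - l.count c) := by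
  intro fuel
  induction fuel with
  | zero => intro l cur acc h; omega
  | succ n ih =>
    intro l cur acc h
    cases l with
    | nil => simp [PySem.Chars.splitOn.go, Nat.add_comm]
    | cons hd t =>
      have ht : t.length < n := by simpa using Nat.lt_of_succ_lt_succ h
      have hcle := List.count_le_length (l := t) (a := c)
      by_cases hc : c = hd
      · subst hc
        simp only [PySem.Chars.splitOn.go, List.isPrefixOf, beq_self_eq_true, Bool.true_and,
          if_pos, List.length_cons]
        have hd1 : List.drop ((List.nil (α := Char)).length + 1) (c :: t) = t := by simp
        rw [hd1, ih t [] (cur.reverse :: acc) ht]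
        simp [List.count_cons]
        omega
      · have hne : (hd == c) = false := by simp [Ne.symm hc]
        simp only [PySem.Chars.splitOn.go, List.isPrefixOf]
        rw [if_neg (by simp [hc])]
        rw [ih t (hd :: cur) acc ht]
        simp [List.count_cons, hne]
        omega

lemma split_sum (c : Char) (l : List Char) :
    ((PySem.Chars.splitOn l [c]).map List.length).sum = l.length - l.count c := by
  simpa using splitGo_sum c (l.length + 1) l [] [] (Nat.lt_succ_self _)

-- membership in B's inverted index is exactly A's successful dict lookup with that value
lemma mem_keysWithVal (lexicon : List (String × Int)) (val : Int) (k : String) :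
    (keysWithVal lexicon val).contains k = ((PySem.Dict.ofList lexicon).get? k == some val) := by
  unfold keysWithVal
  have hnd : (PySem.Dict.ofList lexicon).keys.Nodup := PySem.Dict.nodup_keys_ofList lexicon
  rw [Bool.eq_iff_iff]
  rw [PySem.Set.contains_iff, PySem.Set.mem_ofList]
  rcases hv : (PySem.Dict.ofList lexicon).get? k with _ | v
  · have hk : k ∉ (PySem.Dict.ofList lexicon).keys :=
      (PySem.Dict.get?_eq_none_iff_not_mem_keys _ _).mp hv
    simp only [List.mem_map, List.mem_filter, beq_iff_eq]
    constructor
    · rintro ⟨⟨k', v'⟩, ⟨hmem, _⟩, rfl⟩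
      exact absurd (PySem.Dict.mem_keys_of_mem_items _ hmem) hk
    · intro h; simp at h
  · have hmem : (k, v) ∈ (PySem.Dict.ofList lexicon).items :=
      PySem.Dict.mem_items_of_get?_eq_some _ hv
    simp only [List.mem_map, List.mem_filter, beq_iff_eq, Option.some.injEq]
    constructor
    · rintro ⟨⟨k', v'⟩, ⟨hmem', hval⟩, rfl⟩
      have := PySem.Dict.get?_of_mem_items _ hmem' hnd
      rw [hv] at this
      simp at this hval ⊢
      omega
    · intro h
      exact ⟨(k, v), ⟨hmem, by simpa using h⟩, rfl⟩

-- A's fused fold computes the two lookup counts and the summed word lengths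
lemma fold_spec (lexicon : List (String × Int)) :
    ∀ (ws : List (List Char)) (p n ch : Int),
    ws.foldl (fun (st : Int × Int × Int) word =>
      let chars := st.2.2 + (word.length : Int)
      match lexGet lexicon (PySem.Chars.lower word) with
      | some v =>
          if v == 1 then (st.1 + 1, st.2.1, chars)
          else if v == 0 then (st.1, st.2.1 + 1, chars)
          else (st.1, st.2.1, chars)
      | none => (st.1, st.2.1, chars)) (p, n, ch)
    = (p + (ws.countP (fun w => lexGet lexicon (PySem.Chars.lower w) == some 1) : Nat),
       n + (ws.countP (fun w => lexGet lexicon (PySem.Chars.lower w) == some 0) : Nat),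
       ch + ((ws.map List.length).sum : Nat)) := by
  intro ws
  induction ws with
  | nil => intro p n ch; simp
  | cons w t ih =>
    intro p n ch
    simp only [List.foldl_cons, List.countP_cons, List.map_cons, List.sum_cons]
    cases hv : lexGet lexicon (PySem.Chars.lower w) with
    | none =>
      rw [ih]
      simp only [Prod.mk.injEq]
      refine ⟨?_, ?_, ?_⟩ <;> simp [hv] <;> push_cast <;> ring
    | some v =>
      simp only [hv]
      split_ifs with h1 h0 <;>
        (rw [ih]; simp only [Prod.mk.injEq]; refine ⟨?_, ?_, ?_⟩) <;>
        simp_all <;> push_cast <;> ring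

-- ===== VERDICT (by name: the statement is the Claim_ definition above) =====
theorem processTest_spec : Claim_equal_processTest := by
  intro lexicon testPhrase _
  unfold Spec_processTest processTest processTest_alt
  have hbr1 : (fun w => (keysWithVal lexicon 1).contains (String.ofList (PySem.Chars.lower w)))
      = (fun w => lexGet lexicon (PySem.Chars.lower w) == some 1) :=
    funext fun w => mem_keysWithVal lexicon 1 _
  have hbr0 : (fun w => (keysWithVal lexicon 0).contains (String.ofList (PySem.Chars.lower w)))
      = (fun w => lexGet lexicon (PySem.Chars.lower w) == some 0) :=
    funext fun w => mem_keysWithVal lexicon 0 _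
  simp only [fold_spec, hbr1, hbr0, zero_add]
  have hsum := split_sum ' ' testPhrase.toList
  have hcle := List.count_le_length (l := testPhrase.toList) (a := ' ')
  have hcnt : PySem.Str.count testPhrase " " = List.count ' ' testPhrase.toList := by
    simp [PySem.Str.count, charsCount_single]
  have hlen : PySem.Str.len testPhrase = (testPhrase.toList.length : Int) := by
    simp [PySem.Str.len_eq]
  simp only [List.cons.injEq, and_true, true_and]
  rw [hcnt, hlen, hsum]
  push_cast
  omega
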